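-- pv_equiv track=rewrite | github.com/MinChoi0129/Algorithm_Problems | BOJ_Problems/2658.py | isRightTriangle
-- ===== SOURCE A (Python) =====
-- def rotated(board): return [[board[y][x] for y in range(len(board))] for x in range(len(board[0]) - 1, -1, -1)]
--
-- def isRightTriangle(board, w, h):
--     if h <= 1: return [False, None]
--
--     a, b = min(w, h), max(w, h)
--     if a == b: all_triangles = [[['1']*i+['0']*(a-i) for i in range(1, a+1)]]
--     else: all_triangles = [[['0']*(a-i)+['1']*(2*i-1)+['0']*(a-i) for i in range(1, a+1)]]
--
--     for _ in range(3): all_triangles.append(rotated(all_triangles[-1]))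
--
--     if board in all_triangles: return [True, '1234'] if a == b else [True, 'EWSN']
--     else: return [False, None]
-- ===== SOURCE B (Python) =====
-- def isRightTriangle(board, w, h):
--     if h <= 1:
--         return [False, None]
--     a = min(w, h)
--     if a < 1:
--         return [False, None]
--     if w == h:
--         shapes = [(a, a, lambda i, j: j <= i),
--                   (a, a, lambda i, j: a - 1 - i <= j),
--                   (a, a, lambda i, j: i <= j),
--                   (a, a, lambda i, j: i <= a - 1 - j)]
--         token = '1234'
--     else:
--         c = 2 * a - 1
--         shapes = [(a, c, lambda i, j: abs(j - (a - 1)) <= i),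
--                   (c, a, lambda i, j: abs(a - 1 - i) <= j),
--                   (a, c, lambda i, j: abs(a - 1 - j) <= a - 1 - i),
--                   (c, a, lambda i, j: abs(i - (a - 1)) <= a - 1 - j)]
--         token = 'EWSN'
--     for rows, cols, p in shapes:
--         if len(board) == rows and all(
--                 len(row) == cols and all(
--                     cell == ('1' if p(i, j) else '0')
--                     for j, cell in enumerate(row))
--                 for i, row in enumerate(board)):
--             return [True, token]
--     return [False, None]
-- ===== Notes on version B (the rewrite author's own statement) =====
-- stated objective: faster
-- what changed: B never builds or rotates any template: it checks the board directly against closed-form cell predicates (dimensions plus an index formula per orientation), where A materialises the base triangle and three rotated copies and compares whole boards.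
-- crash fix: When h > 1 and w < 1, A raises IndexError (rotated() indexes row 0 of an empty template); B returns [False, None] there. — e.g. on isRightTriangle([], 0, 2): A raises IndexError, B returns (false, none)
import Mathlib
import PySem

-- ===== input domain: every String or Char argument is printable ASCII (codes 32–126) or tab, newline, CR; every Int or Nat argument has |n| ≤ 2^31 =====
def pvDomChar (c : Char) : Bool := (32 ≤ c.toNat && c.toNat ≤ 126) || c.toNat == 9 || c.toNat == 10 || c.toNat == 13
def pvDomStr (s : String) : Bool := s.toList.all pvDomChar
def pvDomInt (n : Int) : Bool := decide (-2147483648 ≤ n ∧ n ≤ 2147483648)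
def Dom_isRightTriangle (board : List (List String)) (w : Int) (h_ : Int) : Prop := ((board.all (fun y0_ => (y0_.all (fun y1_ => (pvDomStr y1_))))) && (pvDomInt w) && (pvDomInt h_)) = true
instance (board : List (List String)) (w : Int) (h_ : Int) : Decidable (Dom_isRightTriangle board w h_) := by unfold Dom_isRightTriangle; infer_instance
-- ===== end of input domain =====

-- B drops A's template construction/rotation and checks the board directly against
-- closed-form per-cell predicates for the four orientations (dimension check + index formula).

-- ===== PORT A =====
-- board[y][x]/board[0] are in range whenever A calls rotated under Pre_ (templates are
-- nonempty with nonempty rows), so pyGetD with a default is exact there.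
def rotated (b : List (List String)) : List (List String) :=
  (PySem.List.pyRange (((PySem.List.pyGetD b 0 []).length : Int) - 1) (-1) (-1)).map
    (fun x => (PySem.List.pyRange 0 (b.length : Int) 1).map
      (fun y => PySem.List.pyGetD (PySem.List.pyGetD b y []) x ""))

def isRightTriangle (board : List (List String)) (w : Int) (h_ : Int) : Bool × Option String :=
  if h_ ≤ 1 then (false, none)
  else
    let a := min w h_
    let b := max w h_
    let all0 : List (List (List String)) :=
      if a = b then
        [(PySem.List.pyRange 1 (a+1) 1).map
          (fun i => PySem.List.pyRepeat ["1"] i ++ PySem.List.pyRepeat ["0"] (a-i))]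
      else
        [(PySem.List.pyRange 1 (a+1) 1).map
          (fun i => PySem.List.pyRepeat ["0"] (a-i) ++ PySem.List.pyRepeat ["1"] (2*i-1) ++ PySem.List.pyRepeat ["0"] (a-i))]
    let all := (List.range 3).foldl (fun acc _ => acc ++ [rotated (acc.getLast?.getD [])]) all0
    if board ∈ all then (if a = b then (true, some "1234") else (true, some "EWSN"))
    else (false, none)

-- ===== PORT B =====
def matchShape (R C : Int) (p : Int → Int → Bool) (board : List (List String)) : Bool :=
  ((board.length : Int) == R) &&
  (PySem.List.enumerate board).all (fun ir =>
    ((ir.2.length : Int) == C) &&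
    (PySem.List.enumerate ir.2).all (fun jc => jc.2 == (if p ir.1 jc.1 then "1" else "0")))

def isRightTriangle_alt (board : List (List String)) (w : Int) (h_ : Int) : Bool × Option String :=
  if h_ ≤ 1 then (false, none)
  else
    let a := min w h_
    if a < 1 then (false, none)
    else if w = h_ then
      if matchShape a a (fun i j => decide (j ≤ i)) board
         || matchShape a a (fun i j => decide (a - 1 - i ≤ j)) board
         || matchShape a a (fun i j => decide (i ≤ j)) board
         || matchShape a a (fun i j => decide (i ≤ a - 1 - j)) board
      then (true, some "1234") else (false, none)
    else
      let c := 2*a - 1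
      if matchShape a c (fun i j => decide (|j - (a-1)| ≤ i)) board
         || matchShape c a (fun i j => decide (|a - 1 - i| ≤ j)) board
         || matchShape a c (fun i j => decide (|a - 1 - j| ≤ a - 1 - i)) board
         || matchShape c a (fun i j => decide (|i - (a-1)| ≤ a - 1 - j)) board
      then (true, some "EWSN") else (false, none)

-- ===== PRECONDITION & SPEC =====
-- Pre_ excludes exactly the inputs where A raises IndexError: h > 1 with w < 1
-- (the template list is then empty and rotated() indexes row 0 of an empty list).
def Pre_isRightTriangle (board : List (List String)) (w : Int) (h_ : Int) : Prop :=
  h_ ≤ 1 ∨ 1 ≤ w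

instance (board : List (List String)) (w : Int) (h_ : Int) : Decidable (Pre_isRightTriangle board w h_) := by
  unfold Pre_isRightTriangle; infer_instance

def pvWitness_isRightTriangle : List (List String) × Int × Int := ([["1"]], 1, 2)

-- When h > 1 and w < 1, A raises IndexError (rotated() indexes row 0 of an empty template); B returns (false, none) there.
def Raises_isRightTriangle (board : List (List String)) (w : Int) (h_ : Int) : Prop :=
  2 ≤ h_ ∧ w ≤ 0

instance (board : List (List String)) (w : Int) (h_ : Int) : Decidable (Raises_isRightTriangle board w h_) := by
  unfold Raises_isRightTriangle; infer_instance

def pvRaiseWitness_isRightTriangle : List (List String) × Int × Int := ([], 0, 2)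
def pvRaiseWitnessOut_isRightTriangle : Bool × Option String := (false, none)

def Spec_isRightTriangle (board : List (List String)) (w : Int) (h_ : Int) (out : Bool × Option String) : Prop := out = isRightTriangle_alt board w h_
instance (board : List (List String)) (w : Int) (h_ : Int) (out : Bool × Option String) : Decidable (Spec_isRightTriangle board w h_ out) := by unfold Spec_isRightTriangle; infer_instance

-- ===== CLAIM (what is proved, stated in full; the proofs are below) =====
def Claim_equal_isRightTriangle : Prop := ∀ (board : List (List String)) (w : Int) (h_ : Int), Dom_isRightTriangle board w h_ → Pre_isRightTriangle board w h_ → Spec_isRightTriangle board w h_ (isRightTriangle board w h_)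

def Claim_raises_isRightTriangle : Prop := (∀ (board : List (List String)) (w : Int) (h_ : Int), Dom_isRightTriangle board w h_ → Raises_isRightTriangle board w h_ → ¬ Pre_isRightTriangle board w h_) ∧ (Dom_isRightTriangle (pvRaiseWitness_isRightTriangle.1) (pvRaiseWitness_isRightTriangle.2.1) (pvRaiseWitness_isRightTriangle.2.2) ∧ Raises_isRightTriangle (pvRaiseWitness_isRightTriangle.1) (pvRaiseWitness_isRightTriangle.2.1) (pvRaiseWitness_isRightTriangle.2.2) ∧ isRightTriangle_alt (pvRaiseWitness_isRightTriangle.1) (pvRaiseWitness_isRightTriangle.2.1) (pvRaiseWitness_isRightTriangle.2.2) = pvRaiseWitnessOut_isRightTriangle)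

-- ===== LEMMAS AND PROOFS =====

-- proof-side closed form of a 0/1 grid
def mkGrid (R C : Nat) (p : Int → Int → Bool) : List (List String) :=
  (List.range R).map (fun (i : Nat) => (List.range C).map (fun (j : Nat) => if p (i : Int) (j : Int) then "1" else "0"))

theorem all_enumerate {α : Type} (g : Int × α → Bool) :
    ∀ (xs : List α) (s : Int),
      ((PySem.List.enumerate xs s).all g = true ↔ ∀ k (h : k < xs.length), g (s + k, xs[k]) = true) := by
  intro xs
  induction xs with
  | nil => intro s; simp [PySem.List.enumerate_nil]
  | cons x xs ih =>
    intro s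
    rw [PySem.List.enumerate_cons]
    simp only [List.all_cons, Bool.and_eq_true, ih (s+1)]
    constructor
    · rintro ⟨h0, h1⟩ k hk
      cases k with
      | zero => simpa using h0
      | succ k =>
        have := h1 k (by simpa using hk)
        simpa [add_assoc, add_comm, add_left_comm] using this
    · intro h
      refine ⟨by simpa using h 0 (by simp), fun k hk => ?_⟩
      have := h (k+1) (by simpa using hk)
      simpa [add_assoc, add_comm, add_left_comm] using this

theorem eq_map_range {α : Type} (xs : List α) (n : Nat) (f : Nat → α) :
    xs = (List.range n).map f ↔ xs.length = n ∧ ∀ k (h : k < xs.length), xs[k] = f k := by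
  constructor
  · intro h; subst h; simp
  · rintro ⟨hl, he⟩
    apply List.ext_getElem (by simp [hl])
    intro i h1 h2
    simpa using he i h1

theorem matchShape_iff (R C : Int) (hR : 0 ≤ R) (hC : 0 ≤ C) (p : Int → Int → Bool)
    (board : List (List String)) :
    matchShape R C p board = true ↔ board = mkGrid R.toNat C.toNat p := by
  unfold matchShape mkGrid
  rw [Bool.and_eq_true, all_enumerate, eq_map_range]
  simp only [beq_iff_eq, Bool.and_eq_true, all_enumerate, zero_add]
  constructor
  · rintro ⟨hlen, hrows⟩
    refine ⟨by omega, fun k hk => ?_⟩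
    obtain ⟨hc, hcells⟩ := hrows k hk
    rw [eq_map_range]
    refine ⟨by omega, fun j hj => ?_⟩
    simpa using hcells j hj
  · rintro ⟨hlen, hrows⟩
    refine ⟨by omega, fun k hk => ?_⟩
    have hrow := hrows k hk
    rw [eq_map_range] at hrow
    obtain ⟨hcl, hcell⟩ := hrow
    refine ⟨by omega, fun j hj => ?_⟩
    simpa using hcell j hj

theorem rep_append_eq (o z : Nat) (x y : String) :
    List.replicate o x ++ List.replicate z y
      = (List.range (o+z)).map (fun j => if j < o then x else y) := by
  apply List.ext_getElem (by simp)
  intro i h1 h2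
  simp only [List.getElem_append, List.getElem_replicate, List.getElem_map, List.getElem_range]
  split_ifs <;> simp_all

theorem rep3_eq (z o : Nat) :
    List.replicate z "0" ++ (List.replicate o "1" ++ List.replicate z "0")
      = (List.range (z+o+z)).map (fun j => if z ≤ j ∧ j < z+o then "1" else "0") := by
  apply List.ext_getElem (by simp; omega)
  intro i h1 h2
  simp only [List.getElem_append, List.getElem_replicate, List.getElem_map, List.getElem_range]
  split_ifs <;> simp_all <;> omega

theorem rotated_mkGrid (R C : Nat) (hR : 1 ≤ R) (p : Int → Int → Bool) :
    rotated (mkGrid R C p) = mkGrid C R (fun r c => p c ((C : Int) - 1 - r)) := by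
  have hhead : (PySem.List.pyGetD (mkGrid R C p) 0 []).length = C := by
    obtain ⟨R', rfl⟩ : ∃ R', R = R' + 1 := ⟨R - 1, by omega⟩
    simp [mkGrid, List.range_succ_eq_map, PySem.List.pyGetD_zero]
  have hlen : (mkGrid R C p).length = R := by simp [mkGrid]
  unfold rotated
  rw [hhead, hlen, PySem.List.pyRange_neg_one]
  have hC : ((C : Int) - 1 - (-1)).toNat = C := by omega
  rw [hC, List.map_map]
  apply List.map_congr_left
  intro r hr
  rw [List.mem_range] at hr
  show (PySem.List.pyRange 0 (R : Int) 1).map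
      (fun y => PySem.List.pyGetD (PySem.List.pyGetD (mkGrid R C p) y []) ((C : Int) - 1 - (r : Int)) "") = _
  rw [PySem.List.pyRange_one]
  have hR' : ((R : Int) - 0).toNat = R := by omega
  rw [hR', List.map_map]
  unfold mkGrid
  apply List.map_congr_left
  intro y hy
  rw [List.mem_range] at hy
  show PySem.List.pyGetD (PySem.List.pyGetD _ ((0 : Int) + (y : Int)) []) ((C : Int) - 1 - (r : Int)) "" = _
  rw [zero_add, PySem.List.pyGetD_natCast]
  rw [List.getD_eq_getElem?_getD, List.getElem?_map, List.getElem?_range hy]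
  simp only [Option.map_some, Option.getD_some]
  rw [PySem.List.pyGetD_eq_getElem _ _ (by omega)
      (by simp only [List.length_map, List.length_range]; omega)]
  rw [List.getElem_map, List.getElem_range]
  have hcast : ((((C : Int) - 1 - (r : Int)).toNat : Int)) = (C : Int) - 1 - (r : Int) := by omega
  rw [hcast]

theorem tri0_square (a : Int) (ha : 1 ≤ a) :
    (PySem.List.pyRange 1 (a+1) 1).map
        (fun i => PySem.List.pyRepeat ["1"] i ++ PySem.List.pyRepeat ["0"] (a-i))
      = mkGrid a.toNat a.toNat (fun i j => decide (j ≤ i)) := by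
  rw [PySem.List.pyRange_one]
  have h0 : ((a : Int) + 1 - 1).toNat = a.toNat := by omega
  rw [h0, List.map_map]
  unfold mkGrid
  apply List.map_congr_left
  intro k hk
  rw [List.mem_range] at hk
  show PySem.List.pyRepeat ["1"] (1 + (k : Int)) ++ PySem.List.pyRepeat ["0"] (a - (1 + (k : Int))) = _
  rw [PySem.List.pyRepeat_singleton, PySem.List.pyRepeat_singleton]
  have h1 : ((1 : Int) + (k : Int)).toNat = k + 1 := by omega
  have h2 : (a - (1 + (k : Int))).toNat = a.toNat - (k + 1) := by omega
  rw [h1, h2, rep_append_eq]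
  have h3 : (k + 1) + (a.toNat - (k + 1)) = a.toNat := by omega
  rw [h3]
  apply List.map_congr_left
  intro j hj
  rw [List.mem_range] at hj
  by_cases hc : j < k + 1
  · simp only [if_pos hc, if_pos (show (decide ((j:Int) ≤ (k:Int))) = true by simp; omega)]
  · simp only [if_neg hc, if_neg (show ¬ ((decide ((j:Int) ≤ (k:Int))) = true) by simp; omega)]

theorem tri0_nonsquare (a : Int) (ha : 1 ≤ a) :
    (PySem.List.pyRange 1 (a+1) 1).map
        (fun i => PySem.List.pyRepeat ["0"] (a-i) ++ PySem.List.pyRepeat ["1"] (2*i-1) ++ PySem.List.pyRepeat ["0"] (a-i))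
      = mkGrid a.toNat (2*a-1).toNat (fun i j => decide (|j - (a-1)| ≤ i)) := by
  rw [PySem.List.pyRange_one]
  have h0 : ((a : Int) + 1 - 1).toNat = a.toNat := by omega
  rw [h0, List.map_map]
  unfold mkGrid
  apply List.map_congr_left
  intro k hk
  rw [List.mem_range] at hk
  show PySem.List.pyRepeat ["0"] (a - (1 + (k : Int))) ++ PySem.List.pyRepeat ["1"] (2*(1 + (k : Int)) - 1) ++ PySem.List.pyRepeat ["0"] (a - (1 + (k : Int))) = _
  simp only [PySem.List.pyRepeat_singleton]
  rw [List.append_assoc]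
  have h1 : (a - (1 + (k : Int))).toNat = a.toNat - 1 - k := by omega
  have h2 : (2*(1 + (k : Int)) - 1).toNat = 2*k + 1 := by omega
  rw [h1, h2, rep3_eq]
  have h3 : (a.toNat - 1 - k) + (2*k + 1) + (a.toNat - 1 - k) = (2*a - 1).toNat := by omega
  rw [h3]
  apply List.map_congr_left
  intro j hj
  rw [List.mem_range] at hj
  by_cases hc : a.toNat - 1 - k ≤ j ∧ j < (a.toNat - 1 - k) + (2*k + 1)
  · simp only [if_pos hc, if_pos (show (decide (|(j:Int) - (a-1)| ≤ (k:Int))) = true by simp [abs_le]; omega)]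
  · simp only [if_neg hc, if_neg (show ¬ ((decide (|(j:Int) - (a-1)| ≤ (k:Int))) = true) by simp [abs_le]; omega)]

-- ===== VERDICT (by name: the statement is the Claim_ definition above) =====
theorem foldl_rot (t0 : List (List String)) :
    (List.range 3).foldl (fun acc _ => acc ++ [rotated (acc.getLast?.getD [])]) [t0]
      = [t0, rotated t0, rotated (rotated t0), rotated (rotated (rotated t0))] := by
  simp [List.range_succ]

theorem isRightTriangle_spec : Claim_equal_isRightTriangle := by
  intro board w h_ _ hpre
  unfold Pre_isRightTriangle at hpre
  unfold Spec_isRightTriangle isRightTriangle isRightTriangle_alt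
  by_cases hh : h_ ≤ 1
  · rw [if_pos hh, if_pos hh]
  · rw [if_neg hh, if_neg hh]
    have ha : 1 ≤ min w h_ := by omega
    rw [if_neg (show ¬ (min w h_ < 1) by omega)]
    dsimp only
    by_cases hw : w = h_
    · subst hw
      simp only [min_self, max_self, if_true]
      rw [foldl_rot, tri0_square w (by omega)]
      have hN : ((w.toNat : Int)) = w := by omega
      have e1 : (fun r c => (fun i j => decide (j ≤ i)) c ((w.toNat : Int) - 1 - r))
          = (fun i j => decide (w - 1 - i ≤ j)) := by
        funext r c; simp only [decide_eq_decide]; omega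
      rw [rotated_mkGrid _ _ (by omega), e1]
      have e2 : (fun r c => (fun i j => decide (w - 1 - i ≤ j)) c ((w.toNat : Int) - 1 - r))
          = (fun i j => decide (i ≤ j)) := by
        funext r c; simp only [decide_eq_decide]; omega
      rw [rotated_mkGrid _ _ (by omega), e2]
      have e3 : (fun r c => (fun i j => decide (i ≤ j)) c ((w.toNat : Int) - 1 - r))
          = (fun i j => decide (i ≤ w - 1 - j)) := by
        funext r c; simp only [decide_eq_decide]; omega
      rw [rotated_mkGrid _ _ (by omega), e3]
      simp only [List.mem_cons, List.not_mem_nil, or_false, Bool.or_eq_true,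
        matchShape_iff _ _ (by omega : (0:Int) ≤ w) (by omega : (0:Int) ≤ w)]
      exact if_congr (by tauto) rfl rfl
    · have hab : ¬ (min w h_ = max w h_) := by omega
      rw [if_neg hab, if_neg hab, if_neg hw]
      have ha1 : (1:Int) ≤ min w h_ := ha
      rw [foldl_rot, tri0_nonsquare (min w h_) ha1]
      have hN : (((min w h_).toNat : Int)) = min w h_ := by omega
      have hW : (((2 * min w h_ - 1).toNat : Int)) = 2 * min w h_ - 1 := by omega
      have e1 : (fun r c => (fun i j => decide (|j - (min w h_ - 1)| ≤ i)) c (((2 * min w h_ - 1).toNat : Int) - 1 - r))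
          = (fun i j => decide (|min w h_ - 1 - i| ≤ j)) := by
        funext r c; simp only [decide_eq_decide, abs_le]; omega
      rw [rotated_mkGrid _ _ (by omega), e1]
      have e2 : (fun r c => (fun i j => decide (|min w h_ - 1 - i| ≤ j)) c (((min w h_).toNat : Int) - 1 - r))
          = (fun i j => decide (|min w h_ - 1 - j| ≤ min w h_ - 1 - i)) := by
        funext r c; simp only [decide_eq_decide, abs_le]; omega
      rw [rotated_mkGrid _ _ (by omega), e2]
      have e3 : (fun r c => (fun i j => decide (|min w h_ - 1 - j| ≤ min w h_ - 1 - i)) c (((2 * min w h_ - 1).toNat : Int) - 1 - r))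
          = (fun i j => decide (|i - (min w h_ - 1)| ≤ min w h_ - 1 - j)) := by
        funext r c; simp only [decide_eq_decide, abs_le]; omega
      rw [rotated_mkGrid _ _ (by omega), e3]
      simp only [List.mem_cons, List.not_mem_nil, or_false, Bool.or_eq_true,
        matchShape_iff _ _ (by omega : (0:Int) ≤ min w h_) (by omega : (0:Int) ≤ 2 * min w h_ - 1),
        matchShape_iff _ _ (by omega : (0:Int) ≤ 2 * min w h_ - 1) (by omega : (0:Int) ≤ min w h_)]
      exact if_congr (by tauto) rfl rfl

theorem isRightTriangle_raises : Claim_raises_isRightTriangle := by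
  unfold Claim_raises_isRightTriangle
  exact ⟨by intro b w h _ hr hp; unfold Raises_isRightTriangle at hr; unfold Pre_isRightTriangle at hp; omega, by decide⟩

theorem pvRaiseWitness_isRightTriangle_ok :
    Dom_isRightTriangle (pvRaiseWitness_isRightTriangle.1) (pvRaiseWitness_isRightTriangle.2.1) (pvRaiseWitness_isRightTriangle.2.2) ∧
    Raises_isRightTriangle (pvRaiseWitness_isRightTriangle.1) (pvRaiseWitness_isRightTriangle.2.1) (pvRaiseWitness_isRightTriangle.2.2) ∧
    isRightTriangle_alt (pvRaiseWitness_isRightTriangle.1) (pvRaiseWitness_isRightTriangle.2.1) (pvRaiseWitness_isRightTriangle.2.2) = pvRaiseWitnessOut_isRightTriangle :=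
  isRightTriangle_raises.2
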